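-- pv_equiv track=rewrite | github.com/harrysokool/AIA-work | python/scripts/HongKong/fetch_agent_count.py | count_agent
-- ===== SOURCE A (Python) =====
-- def count_agent(obj, prefix):
--     if not obj:
--         return (0, 0)
--
--     prefixLength = len(prefix)
--     agent_count = 0
--     agent_skipped = 0
--     agents = obj.get("data", [])
--
--     for agent in agents:
--         lastname = agent.get("engName", "").lower()
--         if lastname and lastname[:prefixLength] == prefix:
--             agent_count += 1
--         else:
--             agent_skipped += 1
--
--     return (agent_count, agent_skipped)
-- ===== SOURCE B (Python) =====
-- def count_agent(obj, prefix):
--     if not obj: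
--         return (0, 0)
--     return _tally(obj.get("data", []), prefix)
--
--
-- def _tally(agents, prefix):
--     # divide-and-conquer: split the list in halves and sum the pair results
--     if not agents:
--         return (0, 0)
--     if len(agents) == 1:
--         name = agents[0].get("engName", "").lower()
--         if name and name[:len(prefix)] == prefix:
--             return (1, 0)
--         return (0, 1)
--     mid = len(agents) // 2
--     m1, s1 = _tally(agents[:mid], prefix)
--     m2, s2 = _tally(agents[mid:], prefix)
--     return (m1 + m2, s1 + s2)
-- ===== Notes on version B (the rewrite author's own statement) =====
-- stated objective: alternative
-- what changed: B counts by divide-and-conquer recursion: split the agent list in halves, tally each half, and add the (matched, skipped) pairs, instead of A's linear loop threading two counters.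
import Mathlib
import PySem

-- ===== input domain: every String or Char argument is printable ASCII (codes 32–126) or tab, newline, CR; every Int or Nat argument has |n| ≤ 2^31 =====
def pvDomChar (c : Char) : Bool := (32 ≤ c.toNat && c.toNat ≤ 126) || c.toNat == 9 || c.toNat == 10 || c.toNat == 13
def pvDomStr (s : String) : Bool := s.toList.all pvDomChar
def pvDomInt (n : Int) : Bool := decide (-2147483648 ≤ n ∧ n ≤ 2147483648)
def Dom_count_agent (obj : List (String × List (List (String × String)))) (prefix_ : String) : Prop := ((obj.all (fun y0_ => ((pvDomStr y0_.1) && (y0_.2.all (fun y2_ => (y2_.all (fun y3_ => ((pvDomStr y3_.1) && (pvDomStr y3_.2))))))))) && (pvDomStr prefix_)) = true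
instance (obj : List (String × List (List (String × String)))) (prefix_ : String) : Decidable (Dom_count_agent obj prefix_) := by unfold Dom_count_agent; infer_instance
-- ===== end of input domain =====

-- B replaces A's linear two-counter loop with divide-and-conquer: split in halves, add the pairs.

-- dict.get(k, dflt) on an association list: first match wins (shared lookup primitive)
def pvGetD {ν : Type} (d : List (String × ν)) (k : String) (dflt : ν) : ν :=
  ((d.find? (fun p => p.1 == k)).map (·.2)).getD dflt

-- ===== PORT A =====
def count_agent (obj : List (String × List (List (String × String)))) (prefix_ : String) : Int × Int :=
  if obj = [] then (0, 0)
  else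
    let prefixLength : Int := PySem.Str.len prefix_
    let agents := pvGetD obj "data" []
    let r := agents.foldl (fun (acc : Int × Int) agent =>
      let lastname := PySem.Chars.lower (pvGetD agent "engName" "").toList
      if (!lastname.isEmpty) && (PySem.List.slice lastname none (some prefixLength) == prefix_.toList)
      then (acc.1 + 1, acc.2)
      else (acc.1, acc.2 + 1)) (0, 0)
    r

-- ===== PORT B =====
-- the one-agent base case of Source B's _tally
def pvBase (prefix_ : String) (agent : List (String × String)) : Int × Int :=
  let name := PySem.Chars.lower (pvGetD agent "engName" "").toList
  if (!name.isEmpty) && (PySem.List.slice name none (some (PySem.Str.len prefix_)) == prefix_.toList)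
  then (1, 0) else (0, 1)

def pvTally (prefix_ : String) : List (List (String × String)) → Int × Int
  | [] => (0, 0)
  | [a] => pvBase prefix_ a
  | a :: b :: rest =>
    let l := a :: b :: rest
    let mid := l.length / 2
    let r1 := pvTally prefix_ (l.take mid)
    let r2 := pvTally prefix_ (l.drop mid)
    (r1.1 + r2.1, r1.2 + r2.2)
termination_by l => l.length
decreasing_by
  · simp [List.length_take]; omega
  · simp [List.length_drop]; omega

def count_agent_alt (obj : List (String × List (List (String × String)))) (prefix_ : String) : Int × Int :=
  if obj = [] then (0, 0)
  else pvTally prefix_ (pvGetD obj "data" [])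

-- ===== PRECONDITION & SPEC =====
def Spec_count_agent (obj : List (String × List (List (String × String)))) (prefix_ : String) (out : Int × Int) : Prop := out = count_agent_alt obj prefix_
instance (obj : List (String × List (List (String × String)))) (prefix_ : String) (out : Int × Int) : Decidable (Spec_count_agent obj prefix_ out) := by unfold Spec_count_agent; infer_instance

-- ===== CLAIM (what is proved, stated in full; the proofs are below) =====
def Claim_equal_count_agent : Prop := ∀ (obj : List (String × List (List (String × String)))) (prefix_ : String), Dom_count_agent obj prefix_ → Spec_count_agent obj prefix_ (count_agent obj prefix_)

-- ===== LEMMAS AND PROOFS =====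

-- the match predicate both ports test on a single agent
def pvMatch (prefix_ : String) (agent : List (String × String)) : Bool :=
  let name := PySem.Chars.lower (pvGetD agent "engName" "").toList
  (!name.isEmpty) && (PySem.List.slice name none (some (PySem.Str.len prefix_)) == prefix_.toList)

-- A's two-counter loop computes (matched count, length - matched count)
lemma foldl_two_counters {α : Type} (p : α → Bool) (xs : List α) (c s : Int) :
    xs.foldl (fun (acc : Int × Int) a => if p a then (acc.1 + 1, acc.2) else (acc.1, acc.2 + 1)) (c, s)
      = (c + xs.countP p, s + ((xs.length : Int) - xs.countP p)) := by
  induction xs generalizing c s with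
  | nil => simp
  | cons x xs ih =>
    simp only [List.foldl_cons, List.countP_cons, List.length_cons]
    by_cases h : p x = true
    · simp [h, ih]; omega
    · simp [h, ih]; omega

-- B's divide-and-conquer tally computes the same closed form
lemma pvTally_eq (prefix_ : String) (l : List (List (String × String))) :
    pvTally prefix_ l = ((l.countP (pvMatch prefix_) : Int), (l.length : Int) - l.countP (pvMatch prefix_)) := by
  induction l using pvTally.induct prefix_ with
  | case1 => simp [pvTally]
  | case2 a =>
    simp only [pvTally, pvBase, pvMatch, List.countP_cons, List.countP_nil, List.length_cons,
      List.length_nil]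
    split_ifs <;> simp_all
  | case3 a b rest _l _mid ih1 ih2 =>
    have e2 : _mid = (a :: b :: rest).length / 2 := rfl
    have e1 : _l = a :: b :: rest := rfl
    rw [e2, e1] at ih1 ih2
    rw [pvTally, ih1, ih2]
    have h := List.take_append_drop ((a :: b :: rest).length / 2) (a :: b :: rest)
    have hc : ((a :: b :: rest).take ((a :: b :: rest).length / 2)).countP (pvMatch prefix_)
        + ((a :: b :: rest).drop ((a :: b :: rest).length / 2)).countP (pvMatch prefix_)
        = (a :: b :: rest).countP (pvMatch prefix_) := by
      conv_rhs => rw [← h]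
      rw [List.countP_append]
    have hl : ((a :: b :: rest).take ((a :: b :: rest).length / 2)).length
        + ((a :: b :: rest).drop ((a :: b :: rest).length / 2)).length
        = (a :: b :: rest).length := by
      conv_rhs => rw [← h]
      rw [List.length_append]
    simp only [Prod.mk.injEq]
    constructor <;> omega

-- ===== VERDICT (by name: the statement is the Claim_ definition above) =====
theorem count_agent_spec : Claim_equal_count_agent := by
  intro obj prefix_ _
  unfold Spec_count_agent count_agent count_agent_alt
  by_cases h : obj = []
  · simp [h]
  · simp only [h, if_false]
    have hfold := foldl_two_counters (pvMatch prefix_) (pvGetD obj "data" []) 0 0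
    rw [pvTally_eq]
    simp only [pvMatch] at hfold
    simpa using hfold
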